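-- pv_equiv track=rewrite | github.com/valentingm1/pythonrepaso | simulacro3.py | racha_mas_larga
-- ===== SOURCE A (Python) =====
-- def racha_mas_larga(tiempos: list[int]) -> tuple[int, int]:
--     # Variables para rastrear la racha actual
--     inicio_actual = 0
--     longitud_actual = 0
--
--     # Variables para rastrear la racha más larga
--     inicio_mejor = -1
--     longitud_mejor = 0
--
--     # Iterar sobre los tiempos
--     for i in range(len(tiempos)):
--         if 1 <= tiempos[i] <= 60:
--             # Si el tiempo es una salida exitosa, extendemos la racha actual
--             if longitud_actual == 0:
--                 inicio_actual = i  # Nueva racha comienza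
--             longitud_actual += 1
--         else:
--             # Si el tiempo no es válido, revisamos si la racha actual es la mejor
--             if longitud_actual > longitud_mejor:
--                 inicio_mejor = inicio_actual
--                 longitud_mejor = longitud_actual
--             # Reiniciamos la racha actual
--             longitud_actual = 0
--
--     # Última comparación después de salir del bucle
--     if longitud_actual > longitud_mejor:
--         inicio_mejor = inicio_actual
--         longitud_mejor = longitud_actual
--
--     # Devolver la tupla con el inicio y el fin de la racha más larga
--     return (inicio_mejor, inicio_mejor + longitud_mejor - 1)
-- ===== SOURCE B (Python) =====
-- def racha_mas_larga(tiempos: list[int]) -> tuple[int, int]: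
--     # Build the maximal runs of valid times as (start, length) tuples first,
--     # then pick the longest run (first one on ties).
--     runs = []
--     start = None
--     for i, t in enumerate(tiempos):
--         if 1 <= t <= 60:
--             if start is None:
--                 start = i
--         elif start is not None:
--             runs.append((start, i - start))
--             start = None
--     if start is not None:
--         runs.append((start, len(tiempos) - start))
--     if not runs:
--         return (-1, -2)
--     s, l = max(runs, key=lambda r: r[1])
--     return (s, s + l - 1)
-- ===== Notes on version B (the rewrite author's own statement) =====
-- stated objective: idiomatic
-- what changed: Replaced the fused best-so-far accumulator loop by a build-then-select decomposition: one scan emits the (start, length) run list, then max(..., key=length) with first-max tie-breaking picks the answer.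
import Mathlib
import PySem

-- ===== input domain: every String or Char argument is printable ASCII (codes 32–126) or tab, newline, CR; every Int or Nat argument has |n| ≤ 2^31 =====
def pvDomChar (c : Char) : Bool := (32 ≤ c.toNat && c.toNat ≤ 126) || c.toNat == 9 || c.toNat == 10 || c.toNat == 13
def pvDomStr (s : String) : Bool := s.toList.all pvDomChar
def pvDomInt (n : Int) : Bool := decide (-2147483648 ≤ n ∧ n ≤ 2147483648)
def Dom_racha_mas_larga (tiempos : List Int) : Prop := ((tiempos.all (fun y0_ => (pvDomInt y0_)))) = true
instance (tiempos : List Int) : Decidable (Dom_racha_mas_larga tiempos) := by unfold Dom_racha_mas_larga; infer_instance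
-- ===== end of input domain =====

-- B replaces A's fused best-so-far accumulator loop by a build-runs-then-pick-max decomposition (same cost, more idiomatic).

-- ===== PORT A =====
-- loop body of A, on the pair (i, tiempos[i]); state = (inicio_actual, longitud_actual, inicio_mejor, longitud_mejor)
def pvStepA (s : Int × Int × Int × Int) (it : Int × Int) : Int × Int × Int × Int :=
  let (inicio_actual, longitud_actual, inicio_mejor, longitud_mejor) := s
  let (i, t) := it
  if 1 ≤ t ∧ t ≤ 60 then
    let inicio_actual := if longitud_actual = 0 then i else inicio_actual
    (inicio_actual, longitud_actual + 1, inicio_mejor, longitud_mejor)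
  else
    if longitud_actual > longitud_mejor then
      (inicio_actual, 0, inicio_actual, longitud_actual)
    else
      (inicio_actual, 0, inicio_mejor, longitud_mejor)

def racha_mas_larga (tiempos : List Int) : Int × Int :=
  -- for i in range(len(tiempos)): … tiempos[i] …  (index always in range, so pyGetD is exact here)
  let s := (PySem.List.pyRange 0 (tiempos.length : Int) 1).foldl
    (fun s i => pvStepA s (i, PySem.List.pyGetD tiempos i 0)) (0, 0, -1, 0)
  let (inicio_actual, longitud_actual, inicio_mejor, longitud_mejor) := s
  let (inicio_mejor, longitud_mejor) :=
    if longitud_actual > longitud_mejor then (inicio_actual, longitud_actual)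
    else (inicio_mejor, longitud_mejor)
  (inicio_mejor, inicio_mejor + longitud_mejor - 1)

-- ===== PORT B =====
-- loop body of B, over enumerate(tiempos); state = (runs, start)
def pvStepB (st : List (Int × Int) × Option Int) (it : Int × Int) : List (Int × Int) × Option Int :=
  let (runs, start) := st
  let (i, t) := it
  if 1 ≤ t ∧ t ≤ 60 then
    (runs, match start with | none => some i | some s => some s)
  else
    match start with
    | some s => (runs ++ [(s, i - s)], none)
    | none => (runs, none)

-- max(runs, key=lambda r: r[1]) keeps the FIRST maximal element: fold with strict '>' (exact)
def pvPickLonger (best r : Int × Int) : Int × Int := if r.2 > best.2 then r else best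

def racha_mas_larga_alt (tiempos : List Int) : Int × Int :=
  let p := (PySem.List.enumerate tiempos).foldl pvStepB ([], none)
  let runs := match p.2 with
    | some s => p.1 ++ [(s, (tiempos.length : Int) - s)]
    | none => p.1
  match runs with
  | [] => (-1, -2)
  | r :: rs =>
    let m := rs.foldl pvPickLonger r
    (m.1, m.1 + m.2 - 1)

-- ===== PRECONDITION & SPEC =====
def Spec_racha_mas_larga (tiempos : List Int) (out : Int × Int) : Prop := out = racha_mas_larga_alt tiempos
instance (tiempos : List Int) (out : Int × Int) : Decidable (Spec_racha_mas_larga tiempos out) := by unfold Spec_racha_mas_larga; infer_instance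

-- ===== CLAIM (what is proved, stated in full; the proofs are below) =====
def Claim_equal_racha_mas_larga : Prop := ∀ (tiempos : List Int), Dom_racha_mas_larga tiempos → Spec_racha_mas_larga tiempos (racha_mas_larga tiempos)

-- ===== LEMMAS AND PROOFS =====

-- finish A's result from the loop state
def pvFinA (s : Int × Int × Int × Int) : Int × Int :=
  let (inicio_actual, longitud_actual, inicio_mejor, longitud_mejor) := s
  let (inicio_mejor, longitud_mejor) :=
    if longitud_actual > longitud_mejor then (inicio_actual, longitud_actual)
    else (inicio_mejor, longitud_mejor)
  (inicio_mejor, inicio_mejor + longitud_mejor - 1)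

-- finish B's result from the loop state, n = total index bound
def pvFinB (n : Int) (st : List (Int × Int) × Option Int) : Int × Int :=
  let runs := match st.2 with
    | some s => st.1 ++ [(s, n - s)]
    | none => st.1
  match runs with
  | [] => (-1, -2)
  | r :: rs =>
    let m := rs.foldl pvPickLonger r
    (m.1, m.1 + m.2 - 1)

theorem pvFold_pos_head (r : Int × Int) (rs : List (Int × Int)) (hr : 0 < r.2) :
    (r :: rs).foldl pvPickLonger (-1, 0) = rs.foldl pvPickLonger r := by
  simp [List.foldl_cons, pvPickLonger, hr]

theorem pvInv (l : List Int) : ∀ (j ia la ib lb : Int) (runs : List (Int × Int)) (start : Option Int),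
    (match start with
     | none => la = 0
     | some s => ia = s ∧ la = j - s ∧ 0 < la) →
    runs.foldl pvPickLonger (-1, 0) = (ib, lb) →
    0 ≤ lb →
    (∀ r ∈ runs, 0 < r.2) →
    pvFinA ((PySem.List.enumerate l j).foldl pvStepA (ia, la, ib, lb))
      = pvFinB (j + l.length) ((PySem.List.enumerate l j).foldl pvStepB (runs, start)) := by
  induction l with
  | nil =>
    intro j ia la ib lb runs start hst hfold hlb hpos
    simp only [PySem.List.enumerate_nil, List.foldl_nil, List.length_nil, Int.natCast_zero,
      add_zero]
    cases start with
    | none =>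
      simp only at hst
      subst hst
      simp only [pvFinA, pvFinB]
      rw [if_neg (by omega)]
      cases runs with
      | nil =>
        simp only [List.foldl_nil, Prod.mk.injEq] at hfold
        obtain ⟨h1, h2⟩ := hfold
        subst h1; subst h2
        rfl
      | cons r rs =>
        rw [pvFold_pos_head r rs (hpos r (by simp))] at hfold
        simp [hfold]
    | some s =>
      obtain ⟨hia, hla, hlapos⟩ := hst
      subst hia hla
      simp only [pvFinA, pvFinB]
      have hall : ∀ r ∈ runs ++ [(ia, j - ia)], 0 < r.2 := by
        intro r hr
        rcases List.mem_append.1 hr with h | h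
        · exact hpos r h
        · rw [List.mem_singleton] at h; subst h; simp only; omega
      have h1 : (runs ++ [(ia, j - ia)]).foldl pvPickLonger (-1, 0)
          = pvPickLonger (ib, lb) (ia, j - ia) := by
        rw [List.foldl_append, hfold]; rfl
      cases hA : runs ++ [(ia, j - ia)] with
      | nil => simp at hA
      | cons r rs =>
        have h2 : rs.foldl pvPickLonger r = pvPickLonger (ib, lb) (ia, j - ia) := by
          rw [← pvFold_pos_head r rs (hall r (by simp [hA])), ← hA, h1]
        simp only [h2, pvPickLonger]
  | cons t l ih =>
    intro j ia la ib lb runs start hst hfold hlb hpos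
    rw [PySem.List.enumerate_cons]
    simp only [List.foldl_cons]
    have hlen : j + ((t :: l).length : Int) = (j + 1) + (l.length : Int) := by
      simp; ring
    rw [hlen]
    by_cases hv : 1 ≤ t ∧ t ≤ 60
    · -- valid time: extend the current run
      cases start with
      | none =>
        simp only at hst; subst hst
        have hA : pvStepA (ia, 0, ib, lb) (j, t) = (j, 1, ib, lb) := by
          simp [pvStepA, hv]
        have hB : pvStepB (runs, none) (j, t) = (runs, some j) := by
          simp [pvStepB, hv]
        rw [hA, hB]
        exact ih (j + 1) j 1 ib lb runs (some j) (by constructor <;> omega) hfold hlb hpos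
      | some s =>
        obtain ⟨hia, hla, hlapos⟩ := hst; subst hia hla
        have hA : pvStepA (ia, j - ia, ib, lb) (j, t) = (ia, (j - ia) + 1, ib, lb) := by
          simp only [pvStepA, if_pos hv]
          rw [if_neg (by omega)]
        have hB : pvStepB (runs, some ia) (j, t) = (runs, some ia) := by
          simp [pvStepB, hv]
        rw [hA, hB]
        have : (j - ia) + 1 = (j + 1) - ia := by ring
        rw [this]
        exact ih (j + 1) ia ((j + 1) - ia) ib lb runs (some ia) (by constructor <;> omega) hfold hlb hpos
    · -- invalid time: close the current run (if any)
      cases start with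
      | none =>
        simp only at hst; subst hst
        have hA : pvStepA (ia, 0, ib, lb) (j, t) = (ia, 0, ib, lb) := by
          simp only [pvStepA, if_neg hv]
          rw [if_neg (by omega)]
        have hB : pvStepB (runs, none) (j, t) = (runs, none) := by
          simp [pvStepB, hv]
        rw [hA, hB]
        exact ih (j + 1) ia 0 ib lb runs none rfl hfold hlb hpos
      | some s =>
        obtain ⟨hia, hla, hlapos⟩ := hst; subst hia hla
        have hB : pvStepB (runs, some ia) (j, t) = (runs ++ [(ia, j - ia)], none) := by
          simp [pvStepB, hv]
        rw [hB]
        have hfold' : (runs ++ [(ia, j - ia)]).foldl pvPickLonger (-1, 0)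
            = pvPickLonger (ib, lb) (ia, j - ia) := by
          rw [List.foldl_append, hfold]; rfl
        have hpos' : ∀ r ∈ runs ++ [(ia, j - ia)], 0 < r.2 := by
          intro r hr
          rcases List.mem_append.1 hr with h | h
          · exact hpos r h
          · rw [List.mem_singleton] at h; subst h; simp only; omega
        by_cases hgt : j - ia > lb
        · have hA : pvStepA (ia, j - ia, ib, lb) (j, t) = (ia, 0, ia, j - ia) := by
            simp only [pvStepA, if_neg hv]
            rw [if_pos (by omega)]
          rw [hA]
          have : pvPickLonger (ib, lb) (ia, j - ia) = (ia, j - ia) := by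
            simp [pvPickLonger, hgt]
          rw [this] at hfold'
          exact ih (j + 1) ia 0 ia (j - ia) (runs ++ [(ia, j - ia)]) none rfl hfold' (by omega) hpos'
        · have hA : pvStepA (ia, j - ia, ib, lb) (j, t) = (ia, 0, ib, lb) := by
            simp only [pvStepA, if_neg hv]
            rw [if_neg (by omega)]
          rw [hA]
          have : pvPickLonger (ib, lb) (ia, j - ia) = (ib, lb) := by
            simp only [pvPickLonger]
            rw [if_neg (by simpa using hgt)]
          rw [this] at hfold'
          exact ih (j + 1) ia 0 ib lb (runs ++ [(ia, j - ia)]) none rfl hfold' hlb hpos'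

theorem pvA_eq_finA (tiempos : List Int) :
    racha_mas_larga tiempos
      = pvFinA ((PySem.List.enumerate tiempos).foldl pvStepA (0, 0, -1, 0)) := by
  unfold racha_mas_larga pvFinA
  rw [PySem.List.enumerate_eq_map_pyRange (d := 0), List.foldl_map]
  simp only [PySem.List.len_eq]

-- ===== VERDICT (by name: the statement is the Claim_ definition above) =====
theorem racha_mas_larga_spec : Claim_equal_racha_mas_larga := by
  intro tiempos _
  unfold Spec_racha_mas_larga
  rw [pvA_eq_finA]
  have := pvInv tiempos 0 0 0 (-1) 0 [] none rfl rfl le_rfl (by simp)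
  rw [this]
  unfold racha_mas_larga_alt pvFinB
  simp
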